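-- pv_equiv track=rewrite | github.com/zdaiot/tree-sitter-torque | code_ast/tests/test_tq.py | get_length_cum
-- ===== SOURCE A (Python) =====
-- def get_length_cum(code_str):
--     codes = code_str.split('\n')
--     lines_length = [len(x)+1 for idx, x in enumerate(codes) if idx<len(codes)-1]
--     cum = 0
--     lines_length_cum = []
--     for line_length in lines_length:
--         cum += line_length
--         lines_length_cum.append(cum)
--     return lines_length_cum
-- ===== SOURCE B (Python) =====
-- def get_length_cum(code_str):
--     return [idx + 1 for idx, ch in enumerate(code_str) if ch == '\n']
-- ===== Notes on version B (the rewrite author's own statement) =====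
-- stated objective: idiomatic
-- what changed: Instead of splitting the string into lines, mapping per-line lengths and accumulating a running sum, B scans the characters once and emits index+1 at each newline character, which directly yields the cumulative offsets.
import Mathlib
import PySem

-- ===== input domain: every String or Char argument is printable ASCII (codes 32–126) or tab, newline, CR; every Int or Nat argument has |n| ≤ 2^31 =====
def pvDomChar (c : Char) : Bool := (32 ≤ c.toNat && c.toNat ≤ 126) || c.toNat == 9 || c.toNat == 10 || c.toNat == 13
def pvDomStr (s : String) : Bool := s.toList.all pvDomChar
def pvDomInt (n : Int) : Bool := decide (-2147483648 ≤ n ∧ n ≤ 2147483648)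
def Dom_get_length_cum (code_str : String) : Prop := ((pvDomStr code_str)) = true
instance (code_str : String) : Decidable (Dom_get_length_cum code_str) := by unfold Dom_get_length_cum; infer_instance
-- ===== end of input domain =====

-- B replaces A's split / per-line lengths / running-sum pipeline by a single scan emitting idx+1
-- at each newline (idiomatic, same O(n) cost).

-- ===== PORT A =====
def get_length_cum (code_str : String) : List Int :=
  let codes := PySem.Chars.splitOn code_str.toList ['\n']
  let lines_length :=
    ((PySem.List.enumerate codes).filter
        (fun p => decide (p.1 < (codes.length : Int) - 1))).map
      (fun p => ((p.2.length : Int) + 1))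
  (lines_length.foldl
      (fun (st : Int × List Int) line_length =>
        (st.1 + line_length, st.2 ++ [st.1 + line_length]))
      (0, [])).2

-- ===== PORT B =====
def get_length_cum_alt (code_str : String) : List Int :=
  ((PySem.List.enumerate code_str.toList).filter
      (fun p => p.2 == '\n')).map (fun p => p.1 + 1)

-- ===== PRECONDITION & SPEC =====
def Spec_get_length_cum (code_str : String) (out : List Int) : Prop := out = get_length_cum_alt code_str
instance (code_str : String) (out : List Int) : Decidable (Spec_get_length_cum code_str out) := by unfold Spec_get_length_cum; infer_instance

-- ===== CLAIM (what is proved, stated in full; the proofs are below) =====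
def Claim_equal_get_length_cum : Prop := ∀ (code_str : String), Dom_get_length_cum code_str → Spec_get_length_cum code_str (get_length_cum code_str)

-- ===== LEMMAS AND PROOFS =====

-- pieces of a char list split on '\n' (reference model of A's `codes`)
def splitNl : List Char → List (List Char)
  | [] => [[]]
  | c :: t => if c = '\n' then [] :: splitNl t else (splitNl t).modifyHead (c :: ·)

-- running-sum list with starting value c (reference model of A's loop)
def cumFold : List Int → Int → List Int
  | [], _ => []
  | x :: xs, c => (c + x) :: cumFold xs (c + x)

-- newline positions shifted by s, each +1 (reference model of B)
def nlpos : List Char → Int → List Int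
  | [], _ => []
  | c :: t, s => if c = '\n' then (s + 1) :: nlpos t (s + 1) else nlpos t (s + 1)

theorem splitNl_ne_nil (cs : List Char) : splitNl cs ≠ [] := by
  cases cs with
  | nil => simp [splitNl]
  | cons c t =>
    simp only [splitNl]
    split
    · simp
    · cases h : splitNl t with
      | nil => exact absurd h (splitNl_ne_nil t)
      | cons p r => simp

theorem splitOn_go_spec (fuel : Nat) :
    ∀ (l cur : List Char) (acc : List (List Char)), l.length < fuel →
      PySem.Chars.splitOn.go ['\n'] fuel l cur acc
        = acc.reverse ++ (splitNl l).modifyHead (cur.reverse ++ ·) := by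
  induction fuel with
  | zero => intro l cur acc h; omega
  | succ fuel ih =>
    intro l cur acc h
    cases l with
    | nil => simp [PySem.Chars.splitOn.go, splitNl]
    | cons c rest =>
      by_cases hc : c = '\n'
      · subst hc
        have hpre : List.isPrefixOf ['\n'] ('\n' :: rest) = true := by
          simp [List.isPrefixOf]
        simp only [PySem.Chars.splitOn.go, hpre, if_pos, List.length_cons, List.length_nil,
          List.drop_succ_cons, List.drop_zero]
        rw [ih rest [] (cur.reverse :: acc) (by simpa using Nat.lt_of_succ_lt_succ h)]
        simp only [splitNl, if_pos rfl, List.append_nil, List.reverse_cons]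
        have : List.modifyHead (fun x => x) (splitNl rest) = splitNl rest := by
          cases splitNl rest <;> simp
        simp [this]
      · have hpre : List.isPrefixOf ['\n'] (c :: rest) = false := by
          simp only [List.isPrefixOf, List.isPrefixOf_nil_left, Bool.and_true, beq_iff_eq]
          exact decide_eq_false (fun h => hc h.symm)
        simp only [PySem.Chars.splitOn.go, hpre, Bool.false_eq_true, if_false]
        rw [ih rest (c :: cur) acc (by simpa using Nat.lt_of_succ_lt_succ h)]
        simp only [splitNl, hc, if_false]
        cases hsp : splitNl rest with
        | nil => exact absurd hsp (splitNl_ne_nil rest)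
        | cons p r => simp

theorem splitOn_eq_splitNl (cs : List Char) :
    PySem.Chars.splitOn cs ['\n'] = splitNl cs := by
  show PySem.Chars.splitOn.go ['\n'] (cs.length + 1) cs [] [] = splitNl cs
  rw [splitOn_go_spec (cs.length + 1) cs [] [] (by omega)]
  cases h : splitNl cs with
  | nil => exact absurd h (splitNl_ne_nil cs)
  | cons p r => simp

theorem enumerate_filter_lt (α : Type) (P : List α) (s : Int) :
    (PySem.List.enumerate P s).filter (fun p => decide (p.1 < s + (P.length : Int) - 1))
      = PySem.List.enumerate P.dropLast s := by
  induction P generalizing s with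
  | nil => simp [PySem.List.enumerate_nil]
  | cons x t ih =>
    cases t with
    | nil => simp [PySem.List.enumerate_cons, PySem.List.enumerate_nil]
    | cons y r =>
      rw [PySem.List.enumerate_cons, List.filter_cons]
      have hx : decide (s < s + ((x :: y :: r).length : Int) - 1) = true := by
        simp; omega
      rw [hx, if_pos rfl]
      have hcong :
          (PySem.List.enumerate (y :: r) (s + 1)).filter
              (fun p => decide (p.1 < s + ((x :: y :: r).length : Int) - 1))
            = (PySem.List.enumerate (y :: r) (s + 1)).filter
              (fun p => decide (p.1 < (s + 1) + (((y :: r).length : Int)) - 1)) := by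
        apply List.filter_congr
        intro p _
        congr 1
        simp only [List.length_cons]
        congr 1
        push_cast
        omega
      rw [hcong, ih (s + 1)]
      simp [PySem.List.enumerate_cons]

theorem foldl_cum (ls : List Int) :
    ∀ (c : Int) (acc : List Int),
      (ls.foldl (fun (st : Int × List Int) x => (st.1 + x, st.2 ++ [st.1 + x])) (c, acc)).2
        = acc ++ cumFold ls c := by
  induction ls with
  | nil => intro c acc; simp [cumFold]
  | cons x xs ih =>
    intro c acc
    simp only [List.foldl_cons, cumFold]
    rw [ih (c + x) (acc ++ [c + x])]
    simp

theorem nlpos_eq_cum (cs : List Char) :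
    ∀ (s : Int),
      nlpos cs s = cumFold ((splitNl cs).dropLast.map (fun x => ((x.length : Int) + 1))) s := by
  induction cs with
  | nil => intro s; simp [nlpos, splitNl, cumFold]
  | cons c t ih =>
    intro s
    by_cases hc : c = '\n'
    · subst hc
      simp only [nlpos, splitNl, if_pos rfl]
      cases h : splitNl t with
      | nil => exact absurd h (splitNl_ne_nil t)
      | cons p r =>
        rw [ih (s + 1), h]
        simp [cumFold, List.dropLast_cons₂]
    · simp only [nlpos, splitNl, hc, if_false]
      cases h : splitNl t with
      | nil => exact absurd h (splitNl_ne_nil t)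
      | cons p r =>
        rw [ih (s + 1), h]
        cases r with
        | nil => simp [cumFold]
        | cons q rs =>
          rw [List.modifyHead_cons, List.dropLast_cons₂, List.dropLast_cons₂,
            List.map_cons, List.map_cons]
          simp only [cumFold, List.length_cons]
          push_cast
          rw [show s + ((p.length : Int) + 1 + 1) = s + 1 + ((p.length : Int) + 1) from by ring]

theorem enumerate_filter_nl (cs : List Char) :
    ∀ (s : Int),
      ((PySem.List.enumerate cs s).filter (fun p => p.2 == '\n')).map (fun p => p.1 + 1)
        = nlpos cs s := by
  induction cs with
  | nil => intro s; simp [PySem.List.enumerate_nil, nlpos]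
  | cons c t ih =>
    intro s
    rw [PySem.List.enumerate_cons, List.filter_cons]
    by_cases hc : c = '\n'
    · subst hc
      simp [nlpos, ih (s + 1)]
    · simp [nlpos, hc, ih (s + 1)]

-- ===== VERDICT (by name: the statement is the Claim_ definition above) =====
theorem get_length_cum_spec : Claim_equal_get_length_cum := by
  intro code_str _
  unfold Spec_get_length_cum get_length_cum get_length_cum_alt
  rw [splitOn_eq_splitNl]
  rw [foldl_cum]
  rw [enumerate_filter_nl code_str.toList 0, nlpos_eq_cum code_str.toList 0]
  have hcong :
      (PySem.List.enumerate (splitNl code_str.toList)).filter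
          (fun p => decide (p.1 < ((splitNl code_str.toList).length : Int) - 1))
        = (PySem.List.enumerate (splitNl code_str.toList)).filter
          (fun p => decide (p.1 < 0 + ((splitNl code_str.toList).length : Int) - 1)) := by
    apply List.filter_congr
    intro p _
    norm_num
  rw [hcong, enumerate_filter_lt (List Char) (splitNl code_str.toList) 0]
  have hmap :
      (PySem.List.enumerate (splitNl code_str.toList).dropLast 0).map
          (fun p => ((p.2.length : Int) + 1))
        = (splitNl code_str.toList).dropLast.map (fun x => ((x.length : Int) + 1)) := by
    rw [show (fun p : Int × List Char => ((p.2.length : Int) + 1))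
          = (fun x : List Char => ((x.length : Int) + 1)) ∘ Prod.snd from rfl,
      ← List.map_map, PySem.List.map_snd_enumerate]
  rw [hmap]
  simp
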